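-- pv_equiv track=rewrite | github.com/ThomasDeb/AdventOfCode | 2024/advent21.py | directional_to_directional_counts
-- ===== SOURCE A (Python) =====
-- def row_col_directional_keypad(key):
--     row0, row1 = "<v>", "x^A"
--     if key in row0:
--         return 0, row0.index(key)
--     elif key in row1:
--         return 1, row1.index(key)
--
-- def keypad_directional(current_key, target_key):
--     keys = ""
--     row_current, col_current = row_col_directional_keypad(current_key)
--     row_target, col_target = row_col_directional_keypad(target_key)
--     if col_current == col_target:
--         if row_current < row_target:
--             keys = "^"
--         elif row_current > row_target:
--             keys = "v"
--     elif row_current == row_target: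
--         if col_current < col_target:
--             keys = ">" * (col_target - col_current)
--         elif col_current > col_target:
--             keys = "<" * (col_current - col_target)
--     else:
--         if current_key == "<":
--             if target_key == "^":
--                 keys = ">^"
--             elif target_key == "A":
--                 keys = ">>^"
--         elif target_key == "<":
--             if current_key == "^":
--                 keys = "v<"
--             elif current_key == "A":
--                 keys = "v<<"
--         elif current_key == "^" and target_key == ">":
--             keys = "v>"
--         elif current_key == ">" and target_key == "^":
--             keys = "<^"
--         elif current_key == "A" and target_key == "v":
--             keys = "<v"
--         elif current_key == "v" and target_key == "A":
--             keys = "^>"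
--     return keys
--
-- def directional_to_directional_counts(counts, start):
--     start_doublet = "A" + start
--     if start_doublet in counts.keys():
--         counts[start_doublet] += 1
--     else:
--         counts[start_doublet] = 1
--     counts_out = {}
--     start_out = keypad_directional("A", start)[0]
--     for doublet in counts.keys():
--         sequence = keypad_directional(doublet[0], doublet[1])
--         if sequence:
--             prev_key = "A"
--             for key in sequence:
--                 d = prev_key + key
--                 if d in counts_out.keys():
--                     counts_out[d] += counts[doublet]
--                 else:
--                     counts_out[d] = counts[doublet]
--                 prev_key = key
--             d = sequence[-1] + "A"
--         else:
--             d = "AA"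
--         if d in counts_out.keys():
--             counts_out[d] += counts[doublet]
--         else:
--             counts_out[d] = counts[doublet]
--     counts_out["A" + start_out] -= 1
--     return counts_out, start_out
-- ===== SOURCE B (Python) =====
-- # Table-driven rewrite: each directional doublet maps to a fixed list of successor
-- # doublets, precomputed once; the loop is a plain lookup + tally (no per-key path
-- # construction or prev-key walk).  Like A, mutates the input dict (counts[ "A"+start ] += 1).
--
-- def row_col_directional_keypad(key):
--     row0, row1 = "<v>", "x^A"
--     if key in row0:
--         return 0, row0.index(key)
--     elif key in row1:
--         return 1, row1.index(key)
--
-- def keypad_directional(current_key, target_key):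
--     keys = ""
--     row_current, col_current = row_col_directional_keypad(current_key)
--     row_target, col_target = row_col_directional_keypad(target_key)
--     if col_current == col_target:
--         if row_current < row_target:
--             keys = "^"
--         elif row_current > row_target:
--             keys = "v"
--     elif row_current == row_target:
--         if col_current < col_target:
--             keys = ">" * (col_target - col_current)
--         elif col_current > col_target:
--             keys = "<" * (col_current - col_target)
--     else:
--         if current_key == "<":
--             if target_key == "^":
--                 keys = ">^"
--             elif target_key == "A":
--                 keys = ">>^"
--         elif target_key == "<":
--             if current_key == "^":
--                 keys = "v<"
--             elif current_key == "A":
--                 keys = "v<<"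
--         elif current_key == "^" and target_key == ">":
--             keys = "v>"
--         elif current_key == ">" and target_key == "^":
--             keys = "<^"
--         elif current_key == "A" and target_key == "v":
--             keys = "<v"
--         elif current_key == "v" and target_key == "A":
--             keys = "^>"
--     return keys
--
-- # doublet -> the doublets of 'A' + keypad_directional(doublet) + 'A', in order
-- EMIT = {
--     '<<': ['AA'], '<v': ['A>', '>A'], '<>': ['A>', '>>', '>A'],
--     '<x': ['A^', '^A'], '<^': ['A>', '>^', '^A'], '<A': ['A>', '>>', '>^', '^A'],
--     'v<': ['A<', '<A'], 'vv': ['AA'], 'v>': ['A>', '>A'],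
--     'vx': ['AA'], 'v^': ['A^', '^A'], 'vA': ['A^', '^>', '>A'],
--     '><': ['A<', '<<', '<A'], '>v': ['A<', '<A'], '>>': ['AA'],
--     '>x': ['AA'], '>^': ['A<', '<^', '^A'], '>A': ['A^', '^A'],
--     'x<': ['Av', 'vA'], 'xv': ['AA'], 'x>': ['AA'],
--     'xx': ['AA'], 'x^': ['A>', '>A'], 'xA': ['A>', '>>', '>A'],
--     '^<': ['Av', 'v<', '<A'], '^v': ['Av', 'vA'], '^>': ['Av', 'v>', '>A'],
--     '^x': ['A<', '<A'], '^^': ['AA'], '^A': ['A>', '>A'],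
--     'A<': ['Av', 'v<', '<<', '<A'], 'Av': ['A<', '<v', 'vA'], 'A>': ['Av', 'vA'],
--     'Ax': ['A<', '<<', '<A'], 'A^': ['A<', '<A'], 'AA': ['AA'],
-- }
--
-- def directional_to_directional_counts(counts, start):
--     start_doublet = "A" + start
--     counts[start_doublet] = counts.get(start_doublet, 0) + 1
--     start_out = keypad_directional("A", start)[0]
--     counts_out = {}
--     for doublet, n in counts.items():
--         for d in EMIT[doublet[:2]]:
--             counts_out[d] = counts_out.get(d, 0) + n
--     counts_out["A" + start_out] -= 1
--     return counts_out, start_out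
-- ===== Notes on version B (the rewrite author's own statement) =====
-- stated objective: alternative
-- what changed: B replaces A's per-doublet path construction (keypad_directional call, empty/non-empty branching and prev_key character walk) with a precomputed 36-entry transition table mapping each doublet to its fixed list of emitted doublets, so the loop body becomes a table lookup plus a tally; the start_doublet mutation is kept identical, equivalence is about the return value.
import Mathlib
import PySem

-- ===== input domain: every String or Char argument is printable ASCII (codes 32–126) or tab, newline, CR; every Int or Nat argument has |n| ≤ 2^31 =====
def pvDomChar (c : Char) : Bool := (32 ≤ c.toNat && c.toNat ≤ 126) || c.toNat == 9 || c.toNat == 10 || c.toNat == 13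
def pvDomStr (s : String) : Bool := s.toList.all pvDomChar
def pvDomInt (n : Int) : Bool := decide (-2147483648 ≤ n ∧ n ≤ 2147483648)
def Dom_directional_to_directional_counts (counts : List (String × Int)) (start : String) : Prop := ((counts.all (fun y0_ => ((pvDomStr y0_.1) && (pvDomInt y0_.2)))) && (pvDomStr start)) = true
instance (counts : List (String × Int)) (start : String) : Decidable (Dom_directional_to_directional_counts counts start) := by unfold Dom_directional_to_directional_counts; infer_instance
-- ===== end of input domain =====

-- B replaces A's per-key path construction and prev_key walk with a precomputed
-- transition table (doublet -> list of emitted doublets) and a plain lookup + tally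
-- loop (objective: alternative/table-driven).  Both A and B mutate the input dict
-- (counts[start_doublet] += 1) identically; the equivalence proved is about the return value.


-- ===== PORT A =====
-- A's helpers `row_col_directional_keypad` and `keypad_directional`.  `none` = Python raises
-- (TypeError when unpacking the `None` returned for a key in neither row).
-- Python's `key in row0` is substring containment (`key` may be a multi-char string: `start`
-- is passed whole as target_key), hence PySem.Chars.isIn / find.
def pvRowCol (key : List Char) : Option (Int × Int) :=
  if PySem.Chars.isIn key "<v>".toList then some (0, PySem.Chars.find "<v>".toList key)
  else if PySem.Chars.isIn key "x^A".toList then some (1, PySem.Chars.find "x^A".toList key)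
  else none

def pvKeypad (cur tgt : List Char) : Option (List Char) :=
  match pvRowCol cur, pvRowCol tgt with
  | some rcc, some rct =>
    some (
      if rcc.2 = rct.2 then
        (if rcc.1 < rct.1 then ['^'] else if rct.1 < rcc.1 then ['v'] else [])
      else if rcc.1 = rct.1 then
        (if rcc.2 < rct.2 then List.replicate (rct.2 - rcc.2).toNat '>'
         else if rct.2 < rcc.2 then List.replicate (rcc.2 - rct.2).toNat '<' else [])
      else if cur = ['<'] then
        (if tgt = ['^'] then ['>','^'] else if tgt = ['A'] then ['>','>','^'] else [])
      else if tgt = ['<'] then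
        (if cur = ['^'] then ['v','<'] else if cur = ['A'] then ['v','<','<'] else [])
      else if cur = ['^'] ∧ tgt = ['>'] then ['v','>']
      else if cur = ['>'] ∧ tgt = ['^'] then ['<','^']
      else if cur = ['A'] ∧ tgt = ['v'] then ['<','v']
      else if cur = ['v'] ∧ tgt = ['A'] then ['^','>']
      else [])
  | _, _ => none

-- A's membership-tested tally: `if d in counts_out: counts_out[d] += n else: counts_out[d] = n`
-- (also the exact shape of the start_doublet mutation with n = 1).
def pvBumpA (co : PySem.Dict String Int) (d : String) (n : Int) : PySem.Dict String Int :=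
  if co.contains d then co.insert d (co.getD d 0 + n) else co.insert d n

-- A's inner `for key in sequence` loop with its prev_key accumulator.
def pvLoopA (n : Int) (co : PySem.Dict String Int) (prev : Char) :
    List Char → PySem.Dict String Int × Char
  | [] => (co, prev)
  | k :: rest => pvLoopA n (pvBumpA co (String.ofList [prev, k]) n) k rest

def directional_to_directional_counts (counts : List (String × Int)) (start : String) :
    (List (String × Int)) × String :=
  let startDoublet : String := String.ofList ('A' :: start.toList)
  let counts1 := pvBumpA (PySem.Dict.ofList counts) startDoublet 1
  match pvKeypad ['A'] start.toList with
  | none => ([], "")            -- Python raises TypeError here (excluded by Pre_)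
  | some [] => ([], "")         -- Python raises IndexError on `[0]` (excluded by Pre_)
  | some (s0 :: _) =>
    let startOut := String.ofList [s0]
    let countsOut := counts1.items.foldl
      (fun co kv =>
        let n := counts1.getD kv.1 0     -- counts[doublet]
        match PySem.List.pyGet? kv.1.toList 0, PySem.List.pyGet? kv.1.toList 1 with
        | some c0, some c1 =>
          match pvKeypad [c0] [c1] with
          | none => co                    -- Python raises TypeError (excluded by Pre_)
          | some [] => pvBumpA co (String.ofList ['A','A']) n          -- `else: d = "AA"`
          | some (k1 :: rest) =>
            let res := pvLoopA n co 'A' (k1 :: rest)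
            pvBumpA res.1 (String.ofList [(k1 :: rest).getLastD 'A', 'A']) n  -- d = sequence[-1] + "A"
        | _, _ => co)                     -- Python raises IndexError (excluded by Pre_)
      PySem.Dict.empty
    let countsOut2 := countsOut.modify (String.ofList ['A', s0]) 0 (· - 1)
    (countsOut2.items, startOut)

-- ===== PORT B =====
-- Source B's hardcoded transition table EMIT, verbatim.
def pvEmitTable : List (String × List String) :=
  [("<<", ["AA"]), ("<v", ["A>", ">A"]), ("<>", ["A>", ">>", ">A"]),
   ("<x", ["A^", "^A"]), ("<^", ["A>", ">^", "^A"]), ("<A", ["A>", ">>", ">^", "^A"]),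
   ("v<", ["A<", "<A"]), ("vv", ["AA"]), ("v>", ["A>", ">A"]),
   ("vx", ["AA"]), ("v^", ["A^", "^A"]), ("vA", ["A^", "^>", ">A"]),
   ("><", ["A<", "<<", "<A"]), (">v", ["A<", "<A"]), (">>", ["AA"]),
   (">x", ["AA"]), (">^", ["A<", "<^", "^A"]), (">A", ["A^", "^A"]),
   ("x<", ["Av", "vA"]), ("xv", ["AA"]), ("x>", ["AA"]),
   ("xx", ["AA"]), ("x^", ["A>", ">A"]), ("xA", ["A>", ">>", ">A"]),
   ("^<", ["Av", "v<", "<A"]), ("^v", ["Av", "vA"]), ("^>", ["Av", "v>", ">A"]),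
   ("^x", ["A<", "<A"]), ("^^", ["AA"]), ("^A", ["A>", ">A"]),
   ("A<", ["Av", "v<", "<<", "<A"]), ("Av", ["A<", "<v", "vA"]), ("A>", ["Av", "vA"]),
   ("Ax", ["A<", "<<", "<A"]), ("A^", ["A<", "<A"]), ("AA", ["AA"])]

def directional_to_directional_counts_alt (counts : List (String × Int)) (start : String) :
    (List (String × Int)) × String :=
  let startDoublet : String := String.ofList ('A' :: start.toList)
  let counts1 := (PySem.Dict.ofList counts).insert startDoublet
      ((PySem.Dict.ofList counts).getD startDoublet 0 + 1)
  match pvKeypad ['A'] start.toList with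
  | none => ([], "")            -- Python raises TypeError here (excluded by Pre_)
  | some [] => ([], "")         -- Python raises IndexError on `[0]` (excluded by Pre_)
  | some (s0 :: _) =>
    let startOut := String.ofList [s0]
    let countsOut := counts1.items.foldl
      (fun co kv =>
        -- EMIT[doublet[:2]] (slice = take 2); `none` = Python raises KeyError (excluded by Pre_)
        match (PySem.Dict.ofList pvEmitTable).get? (String.ofList (kv.1.toList.take 2)) with
        | none => co
        | some ds => ds.foldl (fun co d => co.insert d (co.getD d 0 + kv.2)) co)
      PySem.Dict.empty
    let countsOut2 := countsOut.modify (String.ofList ['A', s0]) 0 (· - 1)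
    (countsOut2.items, startOut)

-- ===== PRECONDITION & SPEC =====
-- Pre_: exactly the inputs where Python A returns: `start` must be one of the 8 substrings of
-- "<v>"/"x^A" that reach a non-empty keypad sequence (anything else raises TypeError or
-- IndexError), and every key of `counts` needs length ≥ 2 with its first two characters on the
-- keypad (else IndexError/TypeError in the loop).
def Pre_directional_to_directional_counts (counts : List (String × Int)) (start : String) : Prop :=
  start ∈ ["<", "v", ">", "x", "^", "x^", "^A", "x^A"] ∧
  ∀ kv ∈ counts, 2 ≤ kv.1.toList.length ∧
    kv.1.toList.getD 0 ' ' ∈ ['<', 'v', '>', 'x', '^', 'A'] ∧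
    kv.1.toList.getD 1 ' ' ∈ ['<', 'v', '>', 'x', '^', 'A']
instance (counts : List (String × Int)) (start : String) : Decidable (Pre_directional_to_directional_counts counts start) := by unfold Pre_directional_to_directional_counts; infer_instance

def pvWitness_directional_to_directional_counts : (List (String × Int)) × String :=
  ([("A<", 2), ("<A", 1)], "<")

def Spec_directional_to_directional_counts (counts : List (String × Int)) (start : String) (out : (List (String × Int)) × String) : Prop := out = directional_to_directional_counts_alt counts start
instance (counts : List (String × Int)) (start : String) (out : (List (String × Int)) × String) : Decidable (Spec_directional_to_directional_counts counts start out) := by unfold Spec_directional_to_directional_counts; infer_instance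

-- ===== CLAIM (what is proved, stated in full; the proofs are below) =====
def Claim_equal_directional_to_directional_counts : Prop := ∀ (counts : List (String × Int)) (start : String), Dom_directional_to_directional_counts counts start → Pre_directional_to_directional_counts counts start → Spec_directional_to_directional_counts counts start (directional_to_directional_counts counts start)

-- ===== LEMMAS AND PROOFS =====

def pvSixKeys : List Char := ['<', 'v', '>', 'x', '^', 'A']

-- A's membership-tested tally is an unconditional get-with-default tally.
theorem pvBumpA_eq (co : PySem.Dict String Int) (d : String) (n : Int) :
    pvBumpA co d n = co.insert d (co.getD d 0 + n) := by
  unfold pvBumpA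
  split_ifs with h
  · rfl
  · rw [PySem.Dict.getD_of_not_contains co 0 (by simpa using h), zero_add]

theorem pvLoopA_snd (n : Int) (seq : List Char) : ∀ (co : PySem.Dict String Int) (prev : Char),
    (pvLoopA n co prev seq).2 = seq.getLastD prev := by
  induction seq with
  | nil => intro co prev; simp [pvLoopA]
  | cons k rest ih =>
      intro co prev
      simp only [pvLoopA, ih]
      cases rest <;> simp [List.getLastD]

-- A fold over the adjacent pairs of prev :: seq ++ ['A'] is A's prev-carrying loop
-- followed by the final `sequence[-1] + "A"` tally.
theorem pvZipFold_eq (n : Int) (seq : List Char) : ∀ (co : PySem.Dict String Int) (prev : Char),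
    ((prev :: (seq ++ ['A'])).zip (seq ++ ['A'])).foldl
      (fun co p => co.insert (String.ofList [p.1, p.2]) (co.getD (String.ofList [p.1, p.2]) 0 + n)) co
    = pvBumpA (pvLoopA n co prev seq).1 (String.ofList [(pvLoopA n co prev seq).2, 'A']) n := by
  induction seq with
  | nil =>
    intro co prev
    simp [pvLoopA, pvBumpA_eq]
  | cons k rest ih =>
    intro co prev
    simp only [List.cons_append, List.zip_cons_cons, List.foldl_cons, pvLoopA]
    rw [ih (co.insert (String.ofList [prev, k]) (co.getD (String.ofList [prev, k]) 0 + n)) k,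
        ← pvBumpA_eq]

-- The hardcoded table agrees with keypad_directional: for keypad characters c0, c1 the
-- sequence exists and EMIT[c0 ++ c1] is the list of adjacent pairs of 'A' + sequence + 'A'.
set_option maxRecDepth 100000 in
theorem pvEmit_spec : ∀ c0 ∈ pvSixKeys, ∀ c1 ∈ pvSixKeys,
    pvKeypad [c0] [c1] = some ((pvKeypad [c0] [c1]).getD []) ∧
    (PySem.Dict.ofList pvEmitTable).get? (String.ofList [c0, c1]) =
      some ((('A' :: ((pvKeypad [c0] [c1]).getD [] ++ ['A'])).zip ((pvKeypad [c0] [c1]).getD [] ++ ['A'])).map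
        (fun p => String.ofList [p.1, p.2])) := by
  intro c0 hc0 c1 hc1
  fin_cases hc0 <;> fin_cases hc1 <;> exact ⟨rfl, rfl⟩

-- keys accumulated by the ofList fold come from the seed dict or the list.
theorem pvKeys_foldl_insert (l : List (String × Int)) :
    ∀ (d : PySem.Dict String Int) (k : String),
      k ∈ (l.foldl (fun d p => d.insert p.1 p.2) d).keys → k ∈ d.keys ∨ k ∈ l.map Prod.fst := by
  induction l with
  | nil => intro d k h; exact Or.inl h
  | cons p rest ih =>
    intro d k h
    rcases ih (d.insert p.1 p.2) k h with h' | h'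
    · rcases List.mem_map.mp h' with ⟨kv, hkv, rfl⟩
      rcases (PySem.Dict.mem_items_insert _ _ _ _).mp hkv with rfl | ⟨hkv', _⟩
      · exact Or.inr (by simp)
      · exact Or.inl (List.mem_map.mpr ⟨kv, hkv', rfl⟩)
    · exact Or.inr (by simp [h'])

-- ===== VERDICT (by name: the statement is the Claim_ definition above) =====
theorem directional_to_directional_counts_spec : Claim_equal_directional_to_directional_counts := by
  intro counts start _dom pre
  obtain ⟨hstart, hkeys⟩ := pre
  unfold Spec_directional_to_directional_counts
  unfold directional_to_directional_counts directional_to_directional_counts_alt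
  simp only [pvBumpA_eq]
  cases hk : pvKeypad ['A'] start.toList with
  | none => rfl
  | some seq0 =>
    cases seq0 with
    | nil => rfl
    | cons s0 tl =>
      dsimp only [List.tail_cons]
      have hnd : ((PySem.Dict.ofList counts).insert (String.ofList ('A' :: start.toList))
          ((PySem.Dict.ofList counts).getD (String.ofList ('A' :: start.toList)) 0 + 1)).keys.Nodup :=
        PySem.Dict.nodup_keys_insert _ _ _ (PySem.Dict.nodup_keys_ofList counts)
      refine congrArg (fun d => ((PySem.Dict.modify d (String.ofList ['A', s0]) 0 (fun x => x - 1)).items, String.ofList [s0])) ?_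
      apply PySem.List.foldl_congr_mem
      intro co kv hmem
      have hval := PySem.Dict.getD_of_mem_items _ (by simpa using hmem) hnd (0 : Int)
      rw [hval]
      -- the first two characters of every tracked doublet are keypad keys
      have hchars : ∃ c0 c1 rest, kv.1.toList = c0 :: c1 :: rest ∧ c0 ∈ pvSixKeys ∧ c1 ∈ pvSixKeys := by
        rcases (PySem.Dict.mem_items_insert _ _ _ _).mp hmem with heq | ⟨hmem', _⟩
        · -- kv is the freshly inserted start doublet 'A' + start
          have h1 : kv.1 = String.ofList ('A' :: start.toList) := by rw [heq]
          fin_cases hstart <;>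
            exact ⟨_, _, _, by rw [h1]; rfl, by decide, by decide⟩
        · -- kv.1 is a key of the input dict, hence a key of the input list
          have hkmem : kv.1 ∈ counts.map Prod.fst := by
            have := PySem.Dict.mem_keys_of_mem_items _ hmem'
            rcases pvKeys_foldl_insert counts PySem.Dict.empty kv.1 this with h | h
            · simp [PySem.Dict.keys_empty] at h
            · exact h
          rcases List.mem_map.mp hkmem with ⟨p, hp, hp1⟩
          obtain ⟨hlen, h0, h1⟩ := hkeys p hp
          rcases hl : p.1.toList with _ | ⟨c0, _ | ⟨c1, rest⟩⟩
          · rw [hl] at hlen; simp at hlen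
          · rw [hl] at hlen; simp at hlen
          · refine ⟨c0, c1, rest, by rw [← hp1, hl], ?_, ?_⟩
            · rw [hl] at h0; simpa [pvSixKeys] using h0
            · rw [hl] at h1; simpa [pvSixKeys] using h1
      obtain ⟨c0, c1, rest, htl, hc0, hc1⟩ := hchars
      obtain ⟨hseq, htab⟩ := pvEmit_spec c0 hc0 c1 hc1
      rw [htl]
      have htake : (c0 :: c1 :: rest).take 2 = [c0, c1] := rfl
      rw [htake]
      rw [PySem.List.pyGet?_zero_cons]
      rw [show PySem.List.pyGet? (c0 :: c1 :: rest) 1 = some c1 from by simp [PySem.List.pyGet?, PySem.List.pyIdx?]]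
      dsimp only
      rw [hseq, htab]
      cases hs : (pvKeypad [c0] [c1]).getD [] with
      | nil =>
        simp
      | cons k1 rest' =>
        dsimp only
        rw [List.foldl_map, pvZipFold_eq, pvLoopA_snd, pvBumpA_eq]
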